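-- pv_equiv track=rewrite | github.com/AndrewLiuZhangZong/lemo_recommender | app/utils/performance.py | optimize_aggregation_pipeline
-- ===== SOURCE A (Python) =====
-- from typing import List, Dict, Any, Callable
--
-- def optimize_aggregation_pipeline(pipeline: List[Dict]) -> List[Dict]:
--     """
--     优化聚合管道
--
--     优化策略:
--     1. $match尽早执行
--     2. $project减少字段
--     3. $limit限制数据量
--     """
--     optimized = []
--     match_stages = []
--     other_stages = []
--
--     # 分离$match阶段
--     for stage in pipeline:
--         if "$match" in stage:
--             match_stages.append(stage)
--         else:
--             other_stages.append(stage)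
--
--     # $match放在最前面
--     optimized.extend(match_stages)
--     optimized.extend(other_stages)
--
--     return optimized
-- ===== SOURCE B (Python) =====
-- def optimize_aggregation_pipeline(pipeline):
--     # Stable sort: $match stages get key 0, others key 1; stability keeps within-group order.
--     return sorted(pipeline, key=lambda s: 0 if "$match" in s else 1)
-- ===== Notes on version B (the rewrite author's own statement) =====
-- stated objective: idiomatic
-- what changed: Replaced the explicit two-list partition-and-concatenate with a single stable sort on a 0/1 key (0 for stages containing "$match"), relying on sort stability for within-group order.
import Mathlib
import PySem

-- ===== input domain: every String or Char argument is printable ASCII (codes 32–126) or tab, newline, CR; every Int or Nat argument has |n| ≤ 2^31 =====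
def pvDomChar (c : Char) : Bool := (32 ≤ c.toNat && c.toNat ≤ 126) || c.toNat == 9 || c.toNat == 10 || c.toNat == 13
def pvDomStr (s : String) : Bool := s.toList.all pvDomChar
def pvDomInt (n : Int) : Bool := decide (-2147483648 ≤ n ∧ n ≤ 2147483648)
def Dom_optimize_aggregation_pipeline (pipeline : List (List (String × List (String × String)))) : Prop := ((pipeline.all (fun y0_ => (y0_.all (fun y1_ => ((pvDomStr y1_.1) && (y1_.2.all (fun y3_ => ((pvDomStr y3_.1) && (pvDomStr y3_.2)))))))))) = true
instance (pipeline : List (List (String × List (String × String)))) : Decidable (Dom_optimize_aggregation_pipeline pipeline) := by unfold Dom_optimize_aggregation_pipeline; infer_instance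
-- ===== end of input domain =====

-- B replaces A's explicit two-list partition by a single stable sort on a 0/1 key (idiomatic, same result).

-- ===== PORT A =====
-- '"$match" in stage' on the dict-as-assoc-list: membership among the keys
def pvHasMatch (stage : List (String × List (String × String))) : Bool :=
  stage.any (fun kv => kv.1 == "$match")

def optimize_aggregation_pipeline (pipeline : List (List (String × List (String × String)))) : List (List (String × List (String × String))) :=
  -- match_stages / other_stages accumulated left to right, then optimized = [] ++ match_stages ++ other_stages
  let p := pipeline.foldl
    (fun (acc : List (List (String × List (String × String))) × List (List (String × List (String × String)))) stage =>
      if pvHasMatch stage then (acc.1 ++ [stage], acc.2) else (acc.1, acc.2 ++ [stage]))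
    ([], [])
  (([] : List (List (String × List (String × String)))) ++ p.1) ++ p.2

-- ===== PORT B =====
def pvKey (stage : List (String × List (String × String))) : Int :=
  if pvHasMatch stage then 0 else 1

def optimize_aggregation_pipeline_alt (pipeline : List (List (String × List (String × String)))) : List (List (String × List (String × String))) :=
  PySem.List.sorted pipeline pvKey

-- ===== PRECONDITION & SPEC =====
def Spec_optimize_aggregation_pipeline (pipeline : List (List (String × List (String × String)))) (out : List (List (String × List (String × String)))) : Prop := out = optimize_aggregation_pipeline_alt pipeline
instance (pipeline : List (List (String × List (String × String)))) (out : List (List (String × List (String × String)))) : Decidable (Spec_optimize_aggregation_pipeline pipeline out) := by unfold Spec_optimize_aggregation_pipeline; infer_instance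

-- ===== CLAIM (what is proved, stated in full; the proofs are below) =====
def Claim_equal_optimize_aggregation_pipeline : Prop := ∀ (pipeline : List (List (String × List (String × String)))), Dom_optimize_aggregation_pipeline pipeline → Spec_optimize_aggregation_pipeline pipeline (optimize_aggregation_pipeline pipeline)

-- ===== LEMMAS AND PROOFS =====

-- inserting a non-match stage goes to the very end (all keys are ≤ 1 = its key)
theorem pv_insert_other (x : List (String × List (String × String))) (ys : List (List (String × List (String × String)))) (hx : pvHasMatch x = false) :
    PySem.List.insertBy (fun a b => decide (pvKey a < pvKey b)) x ys = ys ++ [x] := by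
  apply PySem.List.insertBy_of_forall_not_before
  intro y _
  simp [pvKey, hx]
  split_ifs <;> omega

-- inserting a match stage into (matches ++ others) lands right between the groups
theorem pv_insert_match (x : List (String × List (String × String)))
    (ms os : List (List (String × List (String × String))))
    (hx : pvHasMatch x = true)
    (hms : ∀ s ∈ ms, pvHasMatch s = true) (hos : ∀ s ∈ os, pvHasMatch s = false) :
    PySem.List.insertBy (fun a b => decide (pvKey a < pvKey b)) x (ms ++ os) = ms ++ x :: os := by
  induction ms with
  | nil =>
    cases os with
    | nil => simp [PySem.List.insertBy]
    | cons o os' =>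
      have ho : pvHasMatch o = false := hos o (by simp)
      simp [PySem.List.insertBy, pvKey, hx, ho]
  | cons m ms' ih =>
    have hm : pvHasMatch m = true := hms m (by simp)
    have : ¬ (pvKey x < pvKey m) := by simp [pvKey, hx, hm]
    simp [PySem.List.insertBy, this]
    exact ih (fun s hs => hms s (by simp [hs])) 

-- main invariant: insertion-sorting the rest into (ms ++ os) equals running A's partition from (ms, os)
theorem pv_go (pipeline ms os : List (List (String × List (String × String))))
    (hms : ∀ s ∈ ms, pvHasMatch s = true) (hos : ∀ s ∈ os, pvHasMatch s = false) :
    pipeline.foldl (fun acc x => PySem.List.insertBy (fun a b => decide (pvKey a < pvKey b)) x acc) (ms ++ os)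
      = (pipeline.foldl (fun acc stage => if pvHasMatch stage then (acc.1 ++ [stage], acc.2) else (acc.1, acc.2 ++ [stage])) (ms, os)).1
        ++ (pipeline.foldl (fun acc stage => if pvHasMatch stage then (acc.1 ++ [stage], acc.2) else (acc.1, acc.2 ++ [stage])) (ms, os)).2 := by
  induction pipeline generalizing ms os with
  | nil => simp
  | cons x xs ih =>
    by_cases hx : pvHasMatch x = true
    · have h1 : PySem.List.insertBy (fun a b => decide (pvKey a < pvKey b)) x (ms ++ os) = (ms ++ [x]) ++ os := by
        rw [pv_insert_match x ms os hx hms hos]; simp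
      simp only [List.foldl_cons, hx, h1]
      exact ih (ms ++ [x]) os (by intro s hs; rcases List.mem_append.1 hs with h | h; exact hms s h; simp at h; simpa [h]) hos
    · have hx' : pvHasMatch x = false := by simpa using hx
      have h1 : PySem.List.insertBy (fun a b => decide (pvKey a < pvKey b)) x (ms ++ os) = ms ++ (os ++ [x]) := by
        rw [pv_insert_other x (ms ++ os) hx']; simp
      simp only [List.foldl_cons, hx', Bool.false_eq_true, if_false, h1]
      exact ih ms (os ++ [x]) hms (by intro s hs; rcases List.mem_append.1 hs with h | h; exact hos s h; simp at h; simpa [h])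

-- ===== VERDICT (by name: the statement is the Claim_ definition above) =====
theorem optimize_aggregation_pipeline_spec : Claim_equal_optimize_aggregation_pipeline := by
  intro pipeline _
  unfold Spec_optimize_aggregation_pipeline optimize_aggregation_pipeline optimize_aggregation_pipeline_alt
  rw [PySem.List.sorted_eq_foldl_insertBy]
  have := pv_go pipeline [] [] (by simp) (by simp)
  simp only [List.nil_append] at this ⊢
  exact this.symm
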